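-- pv_equiv track=rewrite | github.com/fakefeik/Python | python-urfu/bmp/steganography.py | decode_size
-- ===== SOURCE A (Python) =====
-- def decode_size(byte_arr, size_end, bits_count=1, step=1):
--     size = 0
--     bits_count_bin = (1 << bits_count) - 1
--     i = size_end - 1
--     j = 0
--     while i >= 0:
--         size_bit = byte_arr[i] & bits_count_bin
--         size |= size_bit << j
--         j += bits_count
--         i -= step
--     return size
-- ===== SOURCE B (Python) =====
-- def decode_size(byte_arr, size_end, bits_count=1, step=1):
--     mask = (1 << bits_count) - 1
--     indices = []
--     i = size_end - 1
--     while i >= 0: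
--         indices.append(i)
--         i -= step
--     size = 0
--     for i in reversed(indices):
--         size = (size << bits_count) | (byte_arr[i] & mask)
--     return size
-- ===== Notes on version B (the rewrite author's own statement) =====
-- stated objective: alternative
-- what changed: B first collects the visited indices, then folds them most-significant-first with a running left-shift (Horner accumulation: size = (size << bits_count) | chunk), eliminating A's per-position shift counter j.
import Mathlib
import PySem

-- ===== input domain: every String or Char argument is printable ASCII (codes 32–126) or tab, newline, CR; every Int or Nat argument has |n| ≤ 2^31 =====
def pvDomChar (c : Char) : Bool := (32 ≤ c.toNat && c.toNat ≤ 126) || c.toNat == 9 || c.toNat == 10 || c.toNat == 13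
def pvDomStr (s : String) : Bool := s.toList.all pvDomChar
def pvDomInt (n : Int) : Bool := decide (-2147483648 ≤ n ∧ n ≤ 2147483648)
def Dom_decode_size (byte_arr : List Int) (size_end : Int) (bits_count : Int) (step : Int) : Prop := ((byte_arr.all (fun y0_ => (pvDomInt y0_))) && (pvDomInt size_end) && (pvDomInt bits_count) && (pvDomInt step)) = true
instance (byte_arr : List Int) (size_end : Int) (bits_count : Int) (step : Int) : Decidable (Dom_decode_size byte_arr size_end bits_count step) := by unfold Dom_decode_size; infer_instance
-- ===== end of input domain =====

-- B re-decomposes A: it collects the visited indices and folds them most-significant-first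
-- with Horner-style shift-or accumulation, dropping A's per-position shift counter j.

-- ===== PORT A =====
-- while loop of A: fuel = size_end.toNat bounds the iteration count whenever step ≥ 1
-- (outside Pre_, where the Python loop diverges or raises, the fuel just runs out);
-- byte_arr[i] is PySem.List.pyGet? with getD 0 — inside Pre_ every visited index is in range.
def decodeLoopA (ba : List Int) (mask bc step : Int) : Nat → Int → Int → Int → Int
  | 0, _, _, size => size
  | fuel+1, i, j, size =>
    if 0 ≤ i then
      decodeLoopA ba mask bc step fuel (i - step) (j + bc)
        (PySem.Int.bor size ((PySem.Int.band ((PySem.List.pyGet? ba i).getD 0) mask) <<< j.toNat))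
    else size

def decode_size (byte_arr : List Int) (size_end : Int) (bits_count : Int) (step : Int) : Int :=
  decodeLoopA byte_arr (((1 : Int) <<< bits_count.toNat) - 1) bits_count step
    size_end.toNat (size_end - 1) 0 0

-- ===== PORT B =====
-- first while loop of B: append each visited index (same fuel bound as A's loop)
def idxLoopB (step : Int) : Nat → Int → List Int → List Int
  | 0, _, acc => acc
  | fuel+1, i, acc => if 0 ≤ i then idxLoopB step fuel (i - step) (acc ++ [i]) else acc

def decode_size_alt (byte_arr : List Int) (size_end : Int) (bits_count : Int) (step : Int) : Int :=
  let mask := ((1 : Int) <<< bits_count.toNat) - 1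
  let idxs := idxLoopB step size_end.toNat (size_end - 1) []
  idxs.reverse.foldl
    (fun s i => PySem.Int.bor (s <<< bits_count.toNat)
      (PySem.Int.band ((PySem.List.pyGet? byte_arr i).getD 0) mask)) 0

-- ===== PRECONDITION & SPEC =====
-- Pre_ is exactly where the Python A returns: bits_count < 0 raises ValueError at the mask,
-- and for size_end ≥ 1 a step ≤ 0 diverges or runs off the list (IndexError), while the
-- largest visited index size_end-1 must be inside the list.
def Pre_decode_size (byte_arr : List Int) (size_end : Int) (bits_count : Int) (step : Int) : Prop :=
  0 ≤ bits_count ∧ (size_end ≤ 0 ∨ (1 ≤ step ∧ size_end ≤ byte_arr.length))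
instance (byte_arr : List Int) (size_end : Int) (bits_count : Int) (step : Int) : Decidable (Pre_decode_size byte_arr size_end bits_count step) := by unfold Pre_decode_size; infer_instance

def pvWitness_decode_size : List Int × Int × Int × Int := ([5, 3, 7], 3, 2, 1)

def Spec_decode_size (byte_arr : List Int) (size_end : Int) (bits_count : Int) (step : Int) (out : Int) : Prop := out = decode_size_alt byte_arr size_end bits_count step
instance (byte_arr : List Int) (size_end : Int) (bits_count : Int) (step : Int) (out : Int) : Decidable (Spec_decode_size byte_arr size_end bits_count step out) := by unfold Spec_decode_size; infer_instance

-- ===== CLAIM (what is proved, stated in full; the proofs are below) =====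
def Claim_equal_decode_size : Prop := ∀ (byte_arr : List Int) (size_end : Int) (bits_count : Int) (step : Int), Dom_decode_size byte_arr size_end bits_count step → Pre_decode_size byte_arr size_end bits_count step → Spec_decode_size byte_arr size_end bits_count step (decode_size byte_arr size_end bits_count step)

-- ===== LEMMAS AND PROOFS =====

-- the chunk read at index i
def gVal (ba : List Int) (mask i : Int) : Int :=
  PySem.Int.band ((PySem.List.pyGet? ba i).getD 0) mask

-- the indices A/B visit, in A's order (largest first)
def visited (step : Int) : Nat → Int → List Int
  | 0, _ => []
  | fuel+1, i => if 0 ≤ i then i :: visited step fuel (i - step) else []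

-- the common value: Σ gVal(i_k) · 2^(k·b) over the visited list
def hAdd (ba : List Int) (mask : Int) (b : Nat) : List Int → Int
  | [] => 0
  | i :: rest => gVal ba mask i + hAdd ba mask b rest * 2 ^ b

theorem mask_eq (b : Nat) : ((1 : Int) <<< b) - 1 = 2 ^ b - 1 := by
  rw [Int.shiftLeft_eq, one_mul]

theorem idxLoopB_eq_visited (step : Int) :
    ∀ (fuel : Nat) (i : Int) (acc : List Int),
      idxLoopB step fuel i acc = acc ++ visited step fuel i := by
  intro fuel
  induction fuel with
  | zero => intro i acc; simp [idxLoopB, visited]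
  | succ f ih =>
      intro i acc
      by_cases h : 0 ≤ i
      · simp [idxLoopB, visited, h, ih]
      · simp [idxLoopB, visited, h]

theorem two_pow_pos_int (b : Nat) : (0 : Int) < 2 ^ b := by positivity

theorem band_mask_nonneg (x : Int) (b : Nat) : 0 ≤ PySem.Int.band x (2 ^ b - 1) := by
  have h := two_pow_pos_int b
  rw [PySem.Int.band_comm]
  exact PySem.Int.band_nonneg_of_nonneg_left _ (by omega)

theorem band_mask_lt (x : Int) (b : Nat) : PySem.Int.band x (2 ^ b - 1) < 2 ^ b := by
  have hp := two_pow_pos_int b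
  have hpn : 0 < 2 ^ b := Nat.pow_pos (by omega)
  have hm : (0 : Int) ≤ 2 ^ b - 1 := by omega
  have htm : ((2 : Int) ^ b - 1).toNat = 2 ^ b - 1 := by
    have : ((2 : Int) ^ b) = ((2 ^ b : Nat) : Int) := by push_cast; ring
    omega
  rw [PySem.Int.band.eq_1]
  by_cases hx : 0 ≤ x
  · simp only [if_pos hx, if_pos hm]
    have : x.toNat &&& ((2 : Int) ^ b - 1).toNat < 2 ^ b := by
      rw [htm]; exact Nat.and_lt_two_pow _ (by omega)
    have hc : ((2 : Int) ^ b) = ((2 ^ b : Nat) : Int) := by push_cast; ring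
    omega
  · simp only [if_neg hx, if_pos hm]
    have hle : ((2 : Int) ^ b - 1).toNat - (((2 : Int) ^ b - 1).toNat &&& (-x - 1).toNat)
        ≤ (2 : Nat) ^ b - 1 := by
      have := Nat.sub_le (((2 : Int) ^ b - 1).toNat) ((((2 : Int) ^ b - 1).toNat &&& (-x - 1).toNat))
      omega
    have hc : ((2 : Int) ^ b) = ((2 ^ b : Nat) : Int) := by push_cast; ring
    omega

-- the one bit-level fact: OR of a shifted value with a value below the shift is addition
theorem bor_shift_add (s v : Int) (b : Nat) (hs : 0 ≤ s) (hv : 0 ≤ v) (hvb : v < 2 ^ b) :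
    PySem.Int.bor (s <<< b) v = s * 2 ^ b + v := by
  obtain ⟨m, rfl⟩ := Int.eq_ofNat_of_zero_le hs
  obtain ⟨n, rfl⟩ := Int.eq_ofNat_of_zero_le hv
  have hn : n < 2 ^ b := by exact_mod_cast hvb
  have h2 : ((m : Int) <<< b) = ((m <<< b : Nat) : Int) := by
    rw [Int.shiftLeft_eq, Nat.shiftLeft_eq]; push_cast; ring
  have h1 : (0 : Int) ≤ (m : Int) <<< b := by rw [h2]; positivity
  rw [PySem.Int.bor_of_nonneg h1 (by positivity), h2, Int.toNat_natCast, Int.toNat_natCast,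
    ← Nat.shiftLeft_add_eq_or_of_lt hn m]
  push_cast [Nat.shiftLeft_eq]
  ring

-- A's loop computes size + hAdd(visited) · 2^j, by the low/high split at bit j
theorem loopA_eq (ba : List Int) (bc st : Int) (hbc : 0 ≤ bc) :
    ∀ (fuel : Nat) (i j size : Int), 0 ≤ j → 0 ≤ size → size < 2 ^ j.toNat →
      decodeLoopA ba (2 ^ bc.toNat - 1) bc st fuel i j size
        = size + hAdd ba (2 ^ bc.toNat - 1) bc.toNat (visited st fuel i) * 2 ^ j.toNat := by
  intro fuel
  induction fuel with
  | zero => intro i j size hj hs hsj; simp [decodeLoopA, visited, hAdd]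
  | succ f ih =>
      intro i j size hj hs hsj
      by_cases hi : 0 ≤ i
      · simp only [decodeLoopA, if_pos hi, visited, hAdd]
        set v := PySem.Int.band ((PySem.List.pyGet? ba i).getD 0) (2 ^ bc.toNat - 1) with hv
        have hv0 : 0 ≤ v := band_mask_nonneg _ _
        have hvlt : v < 2 ^ bc.toNat := band_mask_lt _ _
        have hbor : PySem.Int.bor size (v <<< j.toNat) = size + v * 2 ^ j.toNat := by
          rw [PySem.Int.bor_comm, bor_shift_add v size j.toNat hv0 hs hsj]
          ring
        have hjt : (j + bc).toNat = j.toNat + bc.toNat := by omega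
        have hnext : size + v * 2 ^ j.toNat < 2 ^ (j + bc).toNat := by
          have h1 : v * 2 ^ j.toNat ≤ (2 ^ bc.toNat - 1) * 2 ^ j.toNat := by
            have := two_pow_pos_int j.toNat
            nlinarith
          have h2 : (2 : Int) ^ (j.toNat + bc.toNat) = 2 ^ bc.toNat * 2 ^ j.toNat := by
            rw [← pow_add]; ring_nf
          have := two_pow_pos_int j.toNat
          rw [hjt, h2]
          nlinarith
        rw [hbor, ih (i - st) (j + bc) _ (by omega) (by positivity) hnext, hjt]
        have h2 : (2 : Int) ^ (j.toNat + bc.toNat) = 2 ^ j.toNat * 2 ^ bc.toNat := by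
          rw [← pow_add]
        rw [h2]
        unfold gVal
        rw [← hv]
        ring
      · simp [decodeLoopA, if_neg hi, visited, hAdd]

-- B's fold with shift-or is the fold with shift-add (the accumulator stays nonnegative)
theorem foldl_bor_eq_add (ba : List Int) (b : Nat) :
    ∀ (L : List Int) (s : Int), 0 ≤ s →
      L.foldl (fun s i => PySem.Int.bor (s <<< b)
          (PySem.Int.band ((PySem.List.pyGet? ba i).getD 0) (2 ^ b - 1))) s
        = L.foldl (fun s i => s * 2 ^ b + gVal ba (2 ^ b - 1) i) s := by
  intro L
  induction L with
  | nil => intro s hs; simp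
  | cons i rest ih =>
      intro s hs
      have hv0 := band_mask_nonneg ((PySem.List.pyGet? ba i).getD 0) b
      have hvlt := band_mask_lt ((PySem.List.pyGet? ba i).getD 0) b
      have hstep := bor_shift_add s _ b hs hv0 hvlt
      have hp := two_pow_pos_int b
      simp only [List.foldl_cons, hstep, gVal]
      exact ih _ (by positivity)

-- folding shift-add over the reversed list yields the Horner value hAdd
theorem foldl_add_reverse (ba : List Int) (b : Nat) :
    ∀ (L : List Int) (s : Int),
      L.reverse.foldl (fun s i => s * 2 ^ b + gVal ba (2 ^ b - 1) i) s
        = s * 2 ^ (b * L.length) + hAdd ba (2 ^ b - 1) b L := by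
  intro L
  induction L with
  | nil => intro s; simp [hAdd]
  | cons i rest ih =>
      intro s
      simp only [List.reverse_cons, List.foldl_append, List.foldl_cons, List.foldl_nil,
        List.length_cons, hAdd, ih]
      have : (2 : Int) ^ (b * (rest.length + 1)) = 2 ^ (b * rest.length) * 2 ^ b := by
        rw [← pow_add]; ring_nf
      rw [this]
      ring

-- ===== VERDICT (by name: the statement is the Claim_ definition above) =====
theorem decode_size_spec : Claim_equal_decode_size := by
  intro ba se bc st _hdom hpre
  obtain ⟨hbc, _⟩ := hpre
  unfold Spec_decode_size decode_size decode_size_alt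
  rw [mask_eq]
  rw [idxLoopB_eq_visited, List.nil_append]
  rw [foldl_bor_eq_add ba bc.toNat _ 0 le_rfl]
  rw [foldl_add_reverse]
  rw [loopA_eq ba bc st hbc se.toNat (se - 1) 0 0 le_rfl le_rfl (by norm_num)]
  simp
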